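-- pv_equiv track=rewrite | github.com/sdcst-2025/b-200-review-of-tuples-and-lists-Kaboom154 | 200a-Review.py | getMerge
-- ===== SOURCE A (Python) =====
-- def getMerge(list1,list2):
--     for i in list2:
--         if i in list1:
--             pos1 = list1.index(i)
--             list1.insert(pos1,i)
--         else:
--             list1.append(i)
--
--     return list1
-- ===== SOURCE B (Python) =====
-- def getMerge(list1, list2):
--     # counts of each value in list2, one pass
--     cnt = {}
--     for y in list2:
--         cnt[y] = cnt.get(y, 0) + 1
--     base = set(list1)
--     out = []
--     seen = set()
--     for x in list1:
--         if x not in seen: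
--             seen.add(x)
--             out.extend([x] * cnt.get(x, 0))
--         out.append(x)
--     seen2 = set()
--     for y in list2:
--         if y not in base and y not in seen2:
--             seen2.add(y)
--             out.extend([y] * cnt[y])
--     list1[:] = out  # A mutates list1 in place; mirror that
--     return list1
-- ===== Notes on version B (the rewrite author's own statement) =====
-- stated objective: faster
-- what changed: Replaces the per-element 'in'/index/insert scans of list1 with one counting pass over list2 plus set-based first-occurrence reconstruction, so no inner list scan remains.
import Mathlib
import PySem

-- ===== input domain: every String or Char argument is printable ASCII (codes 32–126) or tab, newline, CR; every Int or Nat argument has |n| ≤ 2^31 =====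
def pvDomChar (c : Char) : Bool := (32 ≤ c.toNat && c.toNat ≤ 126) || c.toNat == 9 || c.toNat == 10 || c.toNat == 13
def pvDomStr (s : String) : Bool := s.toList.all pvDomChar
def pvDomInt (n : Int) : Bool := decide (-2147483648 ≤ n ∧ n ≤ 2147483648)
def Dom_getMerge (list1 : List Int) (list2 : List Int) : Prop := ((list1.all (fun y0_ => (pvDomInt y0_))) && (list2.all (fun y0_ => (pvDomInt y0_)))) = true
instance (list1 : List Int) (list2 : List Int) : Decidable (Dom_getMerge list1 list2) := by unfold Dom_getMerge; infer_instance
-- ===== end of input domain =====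

-- B replaces A's repeated list scans (in / index / insert) by one counting pass over
-- list2 and a set-based reconstruction; A mutates list1 in place and B mirrors that
-- (the theorems below are about the return value).

-- ===== PORT A =====
def getMerge (list1 : List Int) (list2 : List Int) : List Int :=
  list2.foldl (fun l1 i =>
    if i ∈ l1 then
      match PySem.List.index? l1 i with
      | some pos1 => PySem.List.insert l1 (pos1 : Int) i
      | none => l1            -- unreachable: guarded by i ∈ l1 (Python would raise)
    else
      l1 ++ [i]) list1

-- ===== PORT B =====
def getMerge_alt (list1 : List Int) (list2 : List Int) : List Int :=
  let cnt : PySem.Dict Int Int :=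
    list2.foldl (fun d y => d.insert y (d.getD y 0 + 1)) PySem.Dict.empty
  let base : PySem.Set Int := PySem.Set.ofList list1
  let p1 : List Int × PySem.Set Int :=
    list1.foldl (fun p x =>
      if x ∈ p.2 then (p.1 ++ [x], p.2)
      else (p.1 ++ List.replicate (cnt.getD x 0).toNat x ++ [x], p.2.add x))
      ([], PySem.Set.empty)
  let p2 : List Int × PySem.Set Int :=
    list2.foldl (fun p y =>
      if ¬ y ∈ base ∧ ¬ y ∈ p.2 then
        (p.1 ++ List.replicate (cnt.getD y 0).toNat y, p.2.add y)
      else p) (p1.1, PySem.Set.empty)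
  p2.1

-- ===== PRECONDITION & SPEC =====
def Spec_getMerge (list1 : List Int) (list2 : List Int) (out : List Int) : Prop := out = getMerge_alt list1 list2
instance (list1 : List Int) (list2 : List Int) (out : List Int) : Decidable (Spec_getMerge list1 list2 out) := by unfold Spec_getMerge; infer_instance

-- ===== CLAIM (what is proved, stated in full; the proofs are below) =====
def Claim_equal_getMerge : Prop := ∀ (list1 : List Int) (list2 : List Int), Dom_getMerge list1 list2 → Spec_getMerge list1 list2 (getMerge list1 list2)

-- ===== LEMMAS AND PROOFS =====

-- spec-side emission functions (seen/excl sets kept as plain lists)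
def pvPart1 (c : Int → Nat) : List Int → List Int → List Int
  | [], _ => []
  | x :: xs, seen =>
    if x ∈ seen then x :: pvPart1 c xs seen
    else (List.replicate (c x) x ++ [x]) ++ pvPart1 c xs (x :: seen)

def pvPart2 (c : Int → Nat) : List Int → List Int → List Int
  | [], _ => []
  | y :: ys, excl =>
    if y ∈ excl then pvPart2 c ys excl
    else List.replicate (c y) y ++ pvPart2 c ys (y :: excl)

def pvM (l1 l2 : List Int) : List Int :=
  pvPart1 (fun x => l2.count x) l1 [] ++ pvPart2 (fun x => l2.count x) l2 l1

-- "insert i before its first occurrence" in direct-recursion form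
def pvInsBF (i : Int) : List Int → List Int
  | [] => [i]
  | x :: xs => if x = i then i :: x :: xs else x :: pvInsBF i xs

theorem stepA_eq_insBF (i : Int) (l : List Int) (h : i ∈ l) :
    (match PySem.List.index? l i with
     | some pos1 => PySem.List.insert l (pos1 : Int) i
     | none => l) = pvInsBF i l := by
  induction l with
  | nil => cases h
  | cons x xs ih =>
    by_cases hx : x = i
    · subst hx
      have h0 : PySem.List.index? (x :: xs) x = some 0 :=
        PySem.List.index?_cons_self x xs
      simp only [h0]
      rw [pvInsBF, if_pos rfl]
      simp [PySem.List.insert_zero]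
    · have hmem : i ∈ xs := by
        cases h with
        | head => exact absurd rfl hx
        | tail _ h' => exact h'
      have hidx := PySem.List.index?_cons_of_ne (v := i) (xs := xs) (fun he => hx he)
      obtain ⟨k, hk⟩ := Option.isSome_iff_exists.mp
        ((PySem.List.index?_isSome_iff (xs := xs) (v := i)).mpr hmem)
      have hk' : PySem.List.index? (x :: xs) i = some (k + 1) := by
        rw [hidx, hk]; rfl
      have hkxs : PySem.List.insert xs (k : Int) i = pvInsBF i xs := by
        have := ih hmem
        rw [hk] at this
        exact this
      have hklen : k ≤ xs.length := by
        obtain ⟨pre, suf, hpre, hlen, _⟩ := (PySem.List.index?_eq_some_iff xs i k).mp hk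
        subst hpre; subst hlen; simp
      simp only [hk']
      have h1 : PySem.List.insert (x :: xs) ((k + 1 : Nat) : Int) i
          = (x :: xs).take (k + 1) ++ i :: (x :: xs).drop (k + 1) := by
        exact PySem.List.insert_natCast (x :: xs) (k + 1) i (by simp; omega)
      have h2 : PySem.List.insert xs ((k : Nat) : Int) i
          = xs.take k ++ i :: xs.drop k := PySem.List.insert_natCast xs k i hklen
      rw [h1]
      simp only [List.take_succ_cons, List.drop_succ_cons, List.cons_append]
      rw [pvInsBF, if_neg hx, ← hkxs, h2]

theorem mem_insBF (i : Int) : ∀ (l : List Int) (y : Int), y ∈ l → y ∈ pvInsBF i l := by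
  intro l
  induction l with
  | nil => intro y h; cases h
  | cons x xs ihl =>
    intro y hy
    rw [pvInsBF]
    by_cases hx : x = i
    · rw [if_pos hx]; exact List.mem_cons_of_mem _ hy
    · rw [if_neg hx]
      rcases List.mem_cons.mp hy with rfl | hy
      · exact List.mem_cons_self
      · exact List.mem_cons_of_mem _ (ihl _ hy)

theorem mem_of_mem_insBF (i : Int) :
    ∀ (l : List Int) (y : Int), i ∈ l → y ∈ pvInsBF i l → y ∈ l := by
  intro l
  induction l with
  | nil => intro y h; cases h
  | cons x xs ihl =>
    intro y hi hy
    rw [pvInsBF] at hy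
    by_cases hx : x = i
    · rw [if_pos hx] at hy
      rcases List.mem_cons.mp hy with rfl | hy
      · rw [hx]; exact List.mem_cons_self
      · exact hy
    · rw [if_neg hx] at hy
      rcases List.mem_cons.mp hy with rfl | hy
      · exact List.mem_cons_self
      · have hixs : i ∈ xs := by
          rcases List.mem_cons.mp hi with rfl | h'
          · exact absurd rfl hx
          · exact h'
        exact List.mem_cons_of_mem _ (ihl _ hixs hy)

theorem self_mem_insBF (i : Int) : ∀ (l : List Int), i ∈ pvInsBF i l := by
  intro l
  induction l with
  | nil => exact List.mem_cons_self
  | cons x xs ihl =>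
    rw [pvInsBF]
    by_cases hx : x = i
    · rw [if_pos hx]; exact List.mem_cons_self
    · rw [if_neg hx]; exact List.mem_cons_of_mem _ ihl

-- congruence: counts that agree off i, with i ∈ seen
theorem pvPart1_congr_seen (c c' : Int → Nat) (i : Int)
    (hcc : ∀ x, x ≠ i → c x = c' x) :
    ∀ (l seen : List Int), i ∈ seen → pvPart1 c l seen = pvPart1 c' l seen := by
  intro l
  induction l with
  | nil => intro seen _; rfl
  | cons x xs ih =>
    intro seen hs
    by_cases hx : x ∈ seen
    · rw [pvPart1, pvPart1, if_pos hx, if_pos hx, ih seen hs]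
    · have hxi : x ≠ i := fun he => hx (he ▸ hs)
      rw [pvPart1, pvPart1, if_neg hx, if_neg hx, hcc x hxi,
        ih (x :: seen) (List.mem_cons_of_mem _ hs)]

theorem pvPart1_congr_notmem (c c' : Int → Nat) (i : Int)
    (hcc : ∀ x, x ≠ i → c x = c' x) :
    ∀ (l seen : List Int), i ∉ l → pvPart1 c l seen = pvPart1 c' l seen := by
  intro l
  induction l with
  | nil => intro seen _; rfl
  | cons x xs ih =>
    intro seen hnl
    have hxi : x ≠ i := fun he => hnl (he ▸ List.mem_cons_self)
    have hxs : i ∉ xs := fun hm => hnl (List.mem_cons_of_mem _ hm)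
    by_cases hx : x ∈ seen
    · rw [pvPart1, pvPart1, if_pos hx, if_pos hx, ih seen hxs]
    · rw [pvPart1, pvPart1, if_neg hx, if_neg hx, hcc x hxi, ih (x :: seen) hxs]

-- congruence for pvPart2: excl lists with same membership, counts agree off i, i excluded
theorem pvPart2_congr (c c' : Int → Nat) (i : Int)
    (hcc : ∀ x, x ≠ i → c x = c' x) :
    ∀ (l excl excl' : List Int), (∀ y, y ∈ excl ↔ y ∈ excl') → i ∈ excl →
      pvPart2 c l excl = pvPart2 c' l excl' := by
  intro l
  induction l with
  | nil => intro _ _ _ _; rfl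
  | cons y ys ih =>
    intro excl excl' hme hi
    by_cases hy : y ∈ excl
    · rw [pvPart2, pvPart2, if_pos hy, if_pos ((hme y).mp hy), ih excl excl' hme hi]
    · have hy' : y ∉ excl' := fun h => hy ((hme y).mpr h)
      have hyi : y ≠ i := fun he => hy (he ▸ hi)
      rw [pvPart2, pvPart2, if_neg hy, if_neg hy', hcc y hyi]
      refine congrArg _ (ih (y :: excl) (y :: excl') ?_ (List.mem_cons_of_mem _ hi))
      intro z; simp [hme z]

-- key lemma, case i ∈ l1: inserting before first occurrence absorbs one count of i
theorem pvPart1_insBF (c c' : Int → Nat) (i : Int)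
    (hci : c i = c' i + 1) (hcc : ∀ x, x ≠ i → c x = c' x) :
    ∀ (l seen : List Int), i ∈ l → i ∉ seen →
      pvPart1 c' (pvInsBF i l) seen = pvPart1 c l seen := by
  intro l
  induction l with
  | nil => intro seen h; cases h
  | cons x xs ih =>
    intro seen hil hns
    by_cases hx : x = i
    · subst hx
      rw [pvInsBF, if_pos rfl]
      rw [pvPart1, if_neg hns, pvPart1, if_pos List.mem_cons_self]
      rw [pvPart1, if_neg hns, hci]
      rw [pvPart1_congr_seen c' c x (fun y hy => (hcc y hy).symm) xs (x :: seen)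
        List.mem_cons_self]
      simp [List.replicate_succ']
    · have hixs : i ∈ xs := by
        rcases List.mem_cons.mp hil with rfl | h'
        · exact absurd rfl hx
        · exact h'
      rw [pvInsBF, if_neg hx]
      by_cases hxs : x ∈ seen
      · rw [pvPart1, if_pos hxs, pvPart1, if_pos hxs, ih seen hixs hns]
      · rw [pvPart1, if_neg hxs, pvPart1, if_neg hxs, hcc x hx,
          ih (x :: seen) hixs (by
            intro h
            rcases List.mem_cons.mp h with h' | h'
            · exact hx h'.symm
            · exact hns h')]

-- appending a fresh element to l1
theorem pvPart1_append_fresh (c : Int → Nat) (i : Int) :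
    ∀ (l seen : List Int), i ∉ l → i ∉ seen →
      pvPart1 c (l ++ [i]) seen = pvPart1 c l seen ++ List.replicate (c i) i ++ [i] := by
  intro l
  induction l with
  | nil => intro seen _ hns; simp [pvPart1, if_neg hns]
  | cons x xs ih =>
    intro seen hnl hns
    have hxi : x ≠ i := fun he => hnl (he ▸ List.mem_cons_self)
    have hixs : i ∉ xs := fun hm => hnl (List.mem_cons_of_mem _ hm)
    by_cases hx : x ∈ seen
    · rw [List.cons_append, pvPart1, if_pos hx, pvPart1, if_pos hx, ih seen hixs hns]
      simp
    · rw [List.cons_append, pvPart1, if_neg hx, pvPart1, if_neg hx,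
        ih (x :: seen) hixs (by
          intro h
          rcases List.mem_cons.mp h with h' | h'
          · exact hxi h'.symm
          · exact hns h')]
      simp

theorem pvPart1_zero : ∀ (l seen : List Int), pvPart1 (fun _ => 0) l seen = l := by
  intro l
  induction l with
  | nil => intro _; rfl
  | cons x xs ih =>
    intro seen
    by_cases hx : x ∈ seen
    · rw [pvPart1, if_pos hx, ih]
    · rw [pvPart1, if_neg hx, ih]; simp

-- one step of A's loop, i already present
theorem pvM_step_mem (i : Int) (rest l1 : List Int) (hmem : i ∈ l1) :
    pvM (pvInsBF i l1) rest = pvM l1 (i :: rest) := by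
  have hci : (i :: rest).count i = rest.count i + 1 := by simp
  have hcc : ∀ x, x ≠ i → (i :: rest).count x = rest.count x := by
    intro x hx
    have hx' : ¬ i = x := fun h => hx h.symm
    simp [hx']
  rw [pvM, pvM]
  refine congrArg₂ _ ?_ ?_
  · exact pvPart1_insBF (fun x => (i :: rest).count x) (fun x => rest.count x) i hci hcc
      l1 [] hmem List.not_mem_nil
  · rw [pvPart2, if_pos hmem]
    exact pvPart2_congr (fun x => rest.count x) (fun x => (i :: rest).count x) i
      (fun x hx => (hcc x hx).symm) rest (pvInsBF i l1) l1
      (fun y => ⟨mem_of_mem_insBF i l1 y hmem, mem_insBF i l1 y⟩) (self_mem_insBF i l1)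

-- one step of A's loop, i new
theorem pvM_step_new (i : Int) (rest l1 : List Int) (hmem : i ∉ l1) :
    pvM (l1 ++ [i]) rest = pvM l1 (i :: rest) := by
  have hci : (i :: rest).count i = rest.count i + 1 := by simp
  have hcc : ∀ x, x ≠ i → (i :: rest).count x = rest.count x := by
    intro x hx
    have hx' : ¬ i = x := fun h => hx h.symm
    simp [hx']
  have h1 : pvPart1 (fun x => rest.count x) l1 [] =
      pvPart1 (fun x => (i :: rest).count x) l1 [] :=
    pvPart1_congr_notmem (fun x => rest.count x) (fun x => (i :: rest).count x) i
      (fun x hx => (hcc x hx).symm) l1 [] hmem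
  have h2 : pvPart2 (fun x => rest.count x) rest (l1 ++ [i]) =
      pvPart2 (fun x => (i :: rest).count x) rest (i :: l1) :=
    pvPart2_congr (fun x => rest.count x) (fun x => (i :: rest).count x) i
      (fun x hx => (hcc x hx).symm) rest (l1 ++ [i]) (i :: l1)
      (by intro y; simp [or_comm]) (by simp)
  have h3 : pvPart2 (fun x => (i :: rest).count x) (i :: rest) l1 =
      List.replicate ((i :: rest).count i) i ++
        pvPart2 (fun x => (i :: rest).count x) rest (i :: l1) := by
    rw [pvPart2, if_neg hmem]
  rw [pvM, pvM,
    pvPart1_append_fresh (fun x => rest.count x) i l1 [] hmem List.not_mem_nil,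
    h1, h2, h3, hci]
  simp [List.replicate_succ', List.append_assoc]

-- main induction: A's fold equals pvM
theorem foldA_eq_pvM : ∀ (l2 l1 : List Int), getMerge l1 l2 = pvM l1 l2 := by
  intro l2
  induction l2 with
  | nil =>
    intro l1
    show l1 = pvM l1 []
    rw [pvM, pvPart2]
    have hz : (fun x => ([] : List Int).count x) = fun _ => 0 := by
      funext x; simp
    rw [hz, pvPart1_zero]
    simp
  | cons i rest ih =>
    intro l1
    have hstep : getMerge l1 (i :: rest) = getMerge
        (if i ∈ l1 then
          (match PySem.List.index? l1 i with
           | some pos1 => PySem.List.insert l1 (pos1 : Int) i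
           | none => l1)
         else l1 ++ [i]) rest := by
      rw [getMerge, getMerge, List.foldl_cons]
    by_cases hmem : i ∈ l1
    · rw [hstep, if_pos hmem, stepA_eq_insBF i l1 hmem, ih, pvM_step_mem i rest l1 hmem]
    · rw [hstep, if_neg hmem, ih, pvM_step_new i rest l1 hmem]

-- ===== bridging B's port to pvM =====

theorem foldB1_eq_pvPart1 (c : Int → Nat) (cnt : PySem.Dict Int Int)
    (hcnt : ∀ x, (cnt.getD x 0).toNat = c x) :
    ∀ (l : List Int) (out : List Int) (s : PySem.Set Int) (sl : List Int),
      (∀ x, x ∈ s ↔ x ∈ sl) →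
      (l.foldl (fun p x =>
        if x ∈ p.2 then (p.1 ++ [x], p.2)
        else (p.1 ++ List.replicate (cnt.getD x 0).toNat x ++ [x], p.2.add x))
        (out, s)).1 = out ++ pvPart1 c l sl := by
  intro l
  induction l with
  | nil => intro out s sl _; simp [pvPart1]
  | cons x xs ih =>
    intro out s sl hme
    rw [List.foldl_cons]
    by_cases hx : x ∈ s
    · rw [if_pos hx]
      rw [ih (out ++ [x]) s sl hme, pvPart1, if_pos ((hme x).mp hx)]
      simp
    · rw [if_neg hx]
      rw [ih _ (s.add x) (x :: sl) (by
        intro y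
        rw [PySem.Set.mem_add]
        constructor
        · rintro (h | h)
          · exact List.mem_cons_of_mem _ ((hme y).mp h)
          · exact h ▸ List.mem_cons_self
        · intro h
          rcases List.mem_cons.mp h with rfl | h
          · exact Or.inr rfl
          · exact Or.inl ((hme y).mpr h))]
      rw [pvPart1, if_neg (fun h => hx ((hme x).mpr h)), hcnt]
      simp

theorem foldB2_eq_pvPart2 (c : Int → Nat) (cnt : PySem.Dict Int Int)
    (hcnt : ∀ x, (cnt.getD x 0).toNat = c x) (base : PySem.Set Int) (l1 : List Int)
    (hbase : ∀ x, x ∈ base ↔ x ∈ l1) :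
    ∀ (l : List Int) (out : List Int) (s : PySem.Set Int) (sl : List Int),
      (∀ x, x ∈ s ↔ x ∈ sl) →
      (l.foldl (fun p y =>
        if ¬ y ∈ base ∧ ¬ y ∈ p.2 then
          (p.1 ++ List.replicate (cnt.getD y 0).toNat y, p.2.add y)
        else p) (out, s)).1 = out ++ pvPart2 c l (l1 ++ sl) := by
  intro l
  induction l with
  | nil => intro out s sl _; simp [pvPart2]
  | cons y ys ih =>
    intro out s sl hme
    rw [List.foldl_cons]
    by_cases hy : ¬ y ∈ base ∧ ¬ y ∈ s
    · rw [if_pos hy]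
      have hyn : y ∉ l1 ++ sl := by
        intro h
        rcases List.mem_append.mp h with h | h
        · exact hy.1 ((hbase y).mpr h)
        · exact hy.2 ((hme y).mpr h)
      rw [ih _ (s.add y) (y :: sl) (by
          intro z
          rw [PySem.Set.mem_add]
          constructor
          · rintro (h | h)
            · exact List.mem_cons_of_mem _ ((hme z).mp h)
            · exact h ▸ List.mem_cons_self
          · intro h
            rcases List.mem_cons.mp h with rfl | h
            · exact Or.inr rfl
            · exact Or.inl ((hme z).mpr h))]
      rw [pvPart2, if_neg hyn, hcnt]
      have hshift : pvPart2 c ys (l1 ++ y :: sl) = pvPart2 c ys (y :: (l1 ++ sl)) := by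
        refine pvPart2_congr c c y (fun _ _ => rfl) ys _ _ ?_ (by simp)
        intro z; simp; tauto
      rw [hshift]
      simp
    · rw [if_neg hy]
      have hym : y ∈ l1 ++ sl := by
        rcases not_and_or.mp hy with h | h
        · exact List.mem_append.mpr (Or.inl ((hbase y).mp (not_not.mp h)))
        · exact List.mem_append.mpr (Or.inr ((hme y).mp (not_not.mp h)))
      rw [ih out s sl hme, pvPart2, if_pos hym]

theorem getMerge_alt_eq_pvM (l1 l2 : List Int) : getMerge_alt l1 l2 = pvM l1 l2 := by
  rw [getMerge_alt]
  have hcnt : ∀ x : Int, ((l2.foldl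
      (fun (d : PySem.Dict Int Int) y => d.insert y (d.getD y 0 + 1))
      PySem.Dict.empty).getD x 0).toNat = l2.count x := by
    intro x
    rw [PySem.Dict.foldl_insert_getD_add_one_eq_counter, PySem.Dict.getD_counter]
    simp
  rw [foldB2_eq_pvPart2 (fun x => l2.count x) _ hcnt (PySem.Set.ofList l1) l1
    (fun x => PySem.Set.mem_ofList l1 x) l2 _ PySem.Set.empty []
    (fun x => by simp [PySem.Set.empty])]
  rw [foldB1_eq_pvPart1 (fun x => l2.count x) _ hcnt l1 [] PySem.Set.empty []
    (fun x => by simp [PySem.Set.empty])]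
  rw [pvM]
  simp

-- ===== VERDICT (by name: the statement is the Claim_ definition above) =====
theorem getMerge_spec : Claim_equal_getMerge := by
  intro l1 l2 _
  show getMerge l1 l2 = getMerge_alt l1 l2
  rw [foldA_eq_pvM, getMerge_alt_eq_pvM]
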